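-- pv_equiv track=rewrite | github.com/SomeOddCodeGuy/WilmerAI | Middleware/utilities/message_transformation_utils.py | _extract_final_query
-- ===== SOURCE A (Python) =====
-- def _extract_final_query(content: str) -> tuple[str | None, list | None]:
--     """
--     Extracts final query and conversation history if content matches 'History:...Query:...' format.
--
--     Returns:
--         A tuple containing (final_query, history_messages) where:
--         - final_query is the extracted query or None if not found
--         - history_messages is a list of message dictionaries or None if not found
--     """
--     history_marker = "History:"
--     query_marker = "Query:"
--
--     # Check for the format markers
--     last_query_index = content.rfind(query_marker)
--     if last_query_index == -1:
--         return None, None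
--
--     content_before_last_query = content[:last_query_index]
--     history_marker_index = content_before_last_query.find(history_marker)
--     if history_marker_index == -1:
--         return None, None
--
--     # Extract the final query
--     start_extraction_index = last_query_index + len(query_marker)
--     final_query = content[start_extraction_index:].strip()
--
--     # Extract the history section
--     history_content = content_before_last_query[history_marker_index + len(history_marker):].strip()
--
--     # Parse the history into messages
--     history_messages = []
--
--     # Split the history by message markers
--     user_markers = ["USER:", "USER: \"\"\""]
--     assistant_markers = ["ASSISTANT:", "ASSISTANT: \"\"\""]
--
--     # Find all user and assistant segments
--     current_index = 0
--     while current_index < len(history_content):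
--         # Find the next user marker
--         user_start = -1
--         user_marker_used = None
--         for marker in user_markers:
--             pos = history_content.find(marker, current_index)
--             if pos != -1 and (user_start == -1 or pos < user_start):
--                 user_start = pos
--                 user_marker_used = marker
--
--         if user_start == -1:
--             break  # No more user messages
--
--         current_index = user_start + len(user_marker_used)
--
--         # Find the next assistant marker
--         assistant_start = -1
--         for marker in assistant_markers:
--             pos = history_content.find(marker, current_index)
--             if pos != -1 and (assistant_start == -1 or pos < assistant_start):
--                 assistant_start = pos
--
--         # Find the next user marker to determine the end of this user's message
--         next_user_start = -1
--         for marker in user_markers: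
--             pos = history_content.find(marker, current_index)
--             if pos != -1 and (next_user_start == -1 or pos < next_user_start):
--                 next_user_start = pos
--
--         # Extract user message content
--         user_end = assistant_start if assistant_start != -1 else next_user_start
--         if user_end == -1:
--             user_end = len(history_content)
--
--         user_content = history_content[current_index:user_end].strip()
--         # Remove triple quotes if present
--         if user_content.startswith('"""') and user_content.endswith('"""'):
--             user_content = user_content[3:-3]
--         history_messages.append({"role": "user", "content": user_content})
--
--         if assistant_start == -1:
--             break  # No assistant response after this user message
--
--         current_index = assistant_start + len(assistant_markers[0])  # Use the shorter marker for extraction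
--
--         # Find the end of assistant message (next user message or end of history)
--         assistant_end = next_user_start if next_user_start != -1 else len(history_content)
--
--         assistant_content = history_content[current_index:assistant_end].strip()
--         # Remove triple quotes if present
--         if assistant_content.startswith('"""') and assistant_content.endswith('"""'):
--             assistant_content = assistant_content[3:-3]
--         history_messages.append({"role": "assistant", "content": assistant_content})
--
--         current_index = assistant_end
--
--     if final_query and history_messages:
--         return final_query, history_messages
--     return None, None
-- ===== SOURCE B (Python) =====
-- def _extract_final_query(content: str) -> tuple:
--     history_marker = "History:"
--     query_marker = "Query:"
--
--     last_query_index = content.rfind(query_marker)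
--     if last_query_index == -1:
--         return None, None
--     content_before_last_query = content[:last_query_index]
--     history_marker_index = content_before_last_query.find(history_marker)
--     if history_marker_index == -1:
--         return None, None
--
--     final_query = content[last_query_index + len(query_marker):].strip()
--     history_content = content_before_last_query[history_marker_index + len(history_marker):].strip()
--
--     # Build a positional index of the markers in one scan each, then walk the
--     # index with two forward-only pointers instead of re-running str.find.
--     L = len(history_content)
--     user_positions = [i for i in range(L) if history_content.startswith("USER:", i)]
--     assistant_positions = [i for i in range(L) if history_content.startswith("ASSISTANT:", i)]
--
--     history_messages = []
--     ui = 0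
--     ai = 0
--     while ui < len(user_positions):
--         start = user_positions[ui] + 5  # len("USER:")
--         ui += 1
--         while ui < len(user_positions) and user_positions[ui] < start:
--             ui += 1
--         next_user = user_positions[ui] if ui < len(user_positions) else None
--         while ai < len(assistant_positions) and assistant_positions[ai] < start:
--             ai += 1
--         assistant = assistant_positions[ai] if ai < len(assistant_positions) else None
--
--         if assistant is not None:
--             user_end = assistant
--         elif next_user is not None:
--             user_end = next_user
--         else:
--             user_end = L
--         history_messages.append({"role": "user",
--                                  "content": _segment(history_content, start, user_end)})
--         if assistant is None:
--             break
--         assistant_end = next_user if next_user is not None else L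
--         history_messages.append({"role": "assistant",
--                                  "content": _segment(history_content, assistant + 10, assistant_end)})
--
--     if final_query and history_messages:
--         return final_query, history_messages
--     return None, None
--
--
-- def _segment(text: str, start: int, end: int) -> str:
--     piece = text[start:end].strip()
--     if piece.startswith('"""') and piece.endswith('"""'):
--         piece = piece[3:-3]
--     return piece
-- ===== Notes on version B (the rewrite author's own statement) =====
-- stated objective: alternative
-- what changed: B builds a positional index of the USER:/ASSISTANT: markers in one scan and walks it with forward-only pointers, instead of A's per-iteration repeated str.find re-scans over four (two of them redundant) marker strings.
import Mathlib
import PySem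

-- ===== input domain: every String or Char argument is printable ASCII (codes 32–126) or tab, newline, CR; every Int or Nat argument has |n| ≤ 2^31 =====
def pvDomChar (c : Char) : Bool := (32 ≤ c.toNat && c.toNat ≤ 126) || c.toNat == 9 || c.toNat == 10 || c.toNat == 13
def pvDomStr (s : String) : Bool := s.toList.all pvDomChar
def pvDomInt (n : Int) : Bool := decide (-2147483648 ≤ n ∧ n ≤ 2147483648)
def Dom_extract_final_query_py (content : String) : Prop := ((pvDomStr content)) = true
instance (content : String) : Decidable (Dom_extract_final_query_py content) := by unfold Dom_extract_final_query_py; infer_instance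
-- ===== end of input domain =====

-- B replaces A's repeated str.find re-scans by a positional index of the two markers
-- built once and walked with forward-only pointers (objective: alternative decomposition).

-- shared marker literals
def pvQuery : List Char := ['Q','u','e','r','y',':']
def pvHistory : List Char := ['H','i','s','t','o','r','y',':']
def pvUser : List Char := ['U','S','E','R',':']
def pvUserQ : List Char := ['U','S','E','R',':',' ','"','"','"']
def pvAsst : List Char := ['A','S','S','I','S','T','A','N','T',':']
def pvAsstQ : List Char := ['A','S','S','I','S','T','A','N','T',':',' ','"','"','"']
def pvQ3 : List Char := ['"','"','"']

-- ===== PORT A =====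
-- `for marker in [m, mq]: pos = content.find(marker, ci); if pos != -1 and (best == -1 or pos < best): ...`
-- unrolled over its two-element marker list; returns (best position, marker used; [] standing for None)
def pvFind2 (hc m mq : List Char) (ci : Int) : Int × List Char :=
  let p1 := PySem.Chars.findFrom hc m ci
  let p2 := PySem.Chars.findFrom hc mq ci
  let s1 : Int := if p1 ≠ -1 ∧ ((-1:Int) = -1 ∨ p1 < -1) then p1 else -1
  let m1 : List Char := if p1 ≠ -1 ∧ ((-1:Int) = -1 ∨ p1 < -1) then m else []
  let s2 : Int := if p2 ≠ -1 ∧ (s1 = -1 ∨ p2 < s1) then p2 else s1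
  let m2 : List Char := if p2 ≠ -1 ∧ (s1 = -1 ∨ p2 < s1) then mq else m1
  (s2, m2)

-- the same for-loop where Python keeps only the position
def pvFindPos2 (hc m mq : List Char) (ci : Int) : Int :=
  let p1 := PySem.Chars.findFrom hc m ci
  let p2 := PySem.Chars.findFrom hc mq ci
  let s1 : Int := if p1 ≠ -1 ∧ ((-1:Int) = -1 ∨ p1 < -1) then p1 else -1
  if p2 ≠ -1 ∧ (s1 = -1 ∨ p2 < s1) then p2 else s1

-- A's while loop; fuel hc.length+1 is enough: each entered iteration that recurses
-- moves current_index forward by at least 5, and iterations stop once it reaches len.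
def pvALoop (hc : List Char) : Nat → Int → List (List (String × String)) → List (List (String × String))
  | 0, _, msgs => msgs
  | fuel+1, ci, msgs =>
    if ci < (hc.length : Int) then
      let uf := pvFind2 hc pvUser pvUserQ ci
      if uf.1 = -1 then msgs
      else
        let ci1 : Int := uf.1 + (uf.2.length : Int)
        let as2 : Int := pvFindPos2 hc pvAsst pvAsstQ ci1
        let nu2 : Int := pvFindPos2 hc pvUser pvUserQ ci1
        let ue0 : Int := if as2 ≠ -1 then as2 else nu2
        let ue : Int := if ue0 = -1 then (hc.length : Int) else ue0
        let uc0 := PySem.Chars.strip (PySem.Chars.slice hc (some ci1) (some ue))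
        let uc := if PySem.Chars.startswith uc0 pvQ3 ∧ PySem.Chars.endswith uc0 pvQ3 then
            PySem.Chars.slice uc0 (some 3) (some (-3)) else uc0
        let msgs1 := msgs ++ [[("role","user"),("content", String.ofList uc)]]
        if as2 = -1 then msgs1
        else
          let ci2 : Int := as2 + (pvAsst.length : Int)
          let ae : Int := if nu2 ≠ -1 then nu2 else (hc.length : Int)
          let ac0 := PySem.Chars.strip (PySem.Chars.slice hc (some ci2) (some ae))
          let ac := if PySem.Chars.startswith ac0 pvQ3 ∧ PySem.Chars.endswith ac0 pvQ3 then
              PySem.Chars.slice ac0 (some 3) (some (-3)) else ac0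
          let msgs2 := msgs1 ++ [[("role","assistant"),("content", String.ofList ac)]]
          pvALoop hc fuel ae msgs2
    else msgs

def extract_final_query_py (content : String) : Option String × (Option (List (List (String × String)))) :=
  let c := content.toList
  let lq := PySem.Chars.rfind c pvQuery
  if lq = -1 then (none, none)
  else
    let before := PySem.Chars.slice c none (some lq)
    let hi := PySem.Chars.find before pvHistory
    if hi = -1 then (none, none)
    else
      let fq := PySem.Chars.strip (PySem.Chars.slice c (some (lq + (pvQuery.length : Int))) none)
      let hc := PySem.Chars.strip (PySem.Chars.slice before (some (hi + (pvHistory.length : Int))) none)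
      let msgs := pvALoop hc (hc.length + 1) 0 []
      if fq ≠ [] ∧ msgs ≠ [] then (some (String.ofList fq), some msgs) else (none, none)

-- ===== PORT B =====
-- _segment helper of Source B
def pvSeg (hc : List Char) (s e : Int) : String :=
  let t0 := PySem.Chars.strip (PySem.Chars.slice hc (some s) (some e))
  let t := if PySem.Chars.startswith t0 pvQ3 ∧ PySem.Chars.endswith t0 pvQ3 then
      PySem.Chars.slice t0 (some 3) (some (-3)) else t0
  String.ofList t

-- the inner pointer-advancing while loops of Source B
def pvSkipLt (c : Int) : List Int → List Int
  | [] => []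
  | p :: ps => if p < c then pvSkipLt c ps else p :: ps

theorem pvSkipLt_length_le (c : Int) (l : List Int) : (pvSkipLt c l).length ≤ l.length := by
  induction l with
  | nil => simp [pvSkipLt]
  | cons p ps ih =>
    simp only [pvSkipLt]
    split
    · exact Nat.le_succ_of_le ih
    · simp

-- [i for i in range(len(hc)) if hc.startswith(m, i)]  (startswith(m, i) with 0 ≤ i ≤ len is exactly: m is a prefix of hc[i:])
def pvOcc (hc m : List Char) : List Int :=
  (PySem.List.pyRange 0 (hc.length : Int)).filter (fun i => PySem.Chars.startswith (hc.drop i.toNat) m)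

-- the main while loop of Source B, recursing on the remaining user-marker positions
def pvBLoop (hc : List Char) : List Int → List Int → List (List (String × String))
  | [], _ => []
  | u :: us, as_ =>
    let start := u + 5
    let us' := pvSkipLt start us
    let as' := pvSkipLt start as_
    match as' with
    | [] =>
      let ue := match us' with | [] => (hc.length : Int) | nu :: _ => nu
      [[("role","user"),("content", pvSeg hc start ue)]]
    | a :: _ =>
      let ae := match us' with | [] => (hc.length : Int) | nu :: _ => nu
      [("role","user"),("content", pvSeg hc start a)] ::
        [("role","assistant"),("content", pvSeg hc (a+10) ae)] ::
        pvBLoop hc us' as'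
  termination_by us _ => us.length
  decreasing_by
    simp only [List.length_cons]
    exact Nat.lt_succ_of_le (pvSkipLt_length_le _ _)

def extract_final_query_py_alt (content : String) : Option String × (Option (List (List (String × String)))) :=
  let c := content.toList
  let lq := PySem.Chars.rfind c pvQuery
  if lq = -1 then (none, none)
  else
    let before := PySem.Chars.slice c none (some lq)
    let hi := PySem.Chars.find before pvHistory
    if hi = -1 then (none, none)
    else
      let fq := PySem.Chars.strip (PySem.Chars.slice c (some (lq + (pvQuery.length : Int))) none)
      let hc := PySem.Chars.strip (PySem.Chars.slice before (some (hi + (pvHistory.length : Int))) none)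
      let msgs := pvBLoop hc (pvOcc hc pvUser) (pvOcc hc pvAsst)
      if fq ≠ [] ∧ msgs ≠ [] then (some (String.ofList fq), some msgs) else (none, none)

-- ===== PRECONDITION & SPEC =====
def Spec_extract_final_query_py (content : String) (out : Option String × (Option (List (List (String × String))))) : Prop := out = extract_final_query_py_alt content
instance (content : String) (out : Option String × (Option (List (List (String × String))))) : Decidable (Spec_extract_final_query_py content out) := by unfold Spec_extract_final_query_py; infer_instance

-- ===== CLAIM (what is proved, stated in full; the proofs are below) =====
def Claim_equal_extract_final_query_py : Prop := ∀ (content : String), Dom_extract_final_query_py content → Spec_extract_final_query_py content (extract_final_query_py content)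

-- ===== LEMMAS AND PROOFS =====

theorem mem_pvOcc {hc m : List Char} {p : Int} :
    p ∈ pvOcc hc m ↔ 0 ≤ p ∧ p < (hc.length : Int) ∧ m <+: hc.drop p.toNat := by
  simp [pvOcc, List.mem_filter, PySem.List.mem_pyRange_one, PySem.Chars.startswith_iff]
  tauto

theorem pvOcc_sorted (hc m : List Char) : (pvOcc hc m).Pairwise (· < ·) := by
  apply List.Pairwise.filter
  rw [show ((hc.length : Int)) = ((hc.length : Nat) : Int) from rfl, PySem.List.pyRange_zero_natCast]
  exact (List.pairwise_lt_range).map _ (by intro a b h; exact_mod_cast h)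

theorem pvOcc_length_le (hc m : List Char) : (pvOcc hc m).length ≤ hc.length := by
  calc (pvOcc hc m).length ≤ (PySem.List.pyRange 0 (hc.length : Int)).length :=
        List.length_filter_le _ _
    _ = hc.length := by
        rw [show ((hc.length : Int)) = ((hc.length : Nat) : Int) from rfl,
          PySem.List.pyRange_zero_natCast]
        simp

theorem pvOcc_filter_len {hc m : List Char} {c : Int} (h : (hc.length : Int) ≤ c) :
    (pvOcc hc m).filter (fun p => decide (c ≤ p)) = [] := by
  rw [List.filter_eq_nil_iff]
  intro p hp
  rcases mem_pvOcc.1 hp with ⟨_, hpl, _⟩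
  simp only [decide_eq_true_eq]
  omega

-- sorted-list filter/skip facts
theorem pvSkipLt_filter {l : List Int} (hl : l.Pairwise (· < ·)) {a c : Int} (hac : a ≤ c) :
    pvSkipLt c (l.filter (fun p => decide (a ≤ p))) = l.filter (fun p => decide (c ≤ p)) := by
  induction l with
  | nil => simp [pvSkipLt]
  | cons x xs ih =>
    rcases List.pairwise_cons.1 hl with ⟨hx, hxs⟩
    by_cases hax : a ≤ x
    · simp only [List.filter_cons, decide_eq_true_eq, hax, if_pos, pvSkipLt]
      by_cases hxc : x < c
      · have hcx : ¬ c ≤ x := by omega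
        simp [hxc, hcx, ih hxs]
      · have hcx : c ≤ x := by omega
        simp only [if_neg hxc, hcx, if_pos]
        congr 1
        apply List.filter_congr
        intro p hp
        have := hx p hp
        simp only [decide_eq_decide]
        constructor <;> intro <;> omega
    · have hcx : ¬ c ≤ x := by omega
      simp only [List.filter_cons, decide_eq_true_eq, hax, hcx, if_false]
      exact ih hxs

theorem filter_tail_eq {l : List Int} (hl : l.Pairwise (· < ·)) {c u : Int} {t : List Int}
    (h : l.filter (fun p => decide (c ≤ p)) = u :: t) :
    t = l.filter (fun p => decide (u + 1 ≤ p)) := by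
  induction l with
  | nil => simp at h
  | cons x xs ih =>
    rcases List.pairwise_cons.1 hl with ⟨hx, hxs⟩
    by_cases hcx : c ≤ x
    · simp only [List.filter_cons, decide_eq_true_eq, hcx, if_pos] at h
      obtain ⟨rfl, rfl⟩ := List.cons_eq_cons.1 h
      have hux : ¬ (x + 1 ≤ x) := by omega
      simp only [List.filter_cons, decide_eq_true_eq, hux, if_false]
      have h1 : List.filter (fun p => decide (c ≤ p)) xs = xs :=
        List.filter_eq_self.2 (fun p hp => by simp only [decide_eq_true_eq]; have := hx p hp; omega)
      have h2 : List.filter (fun p => decide (x + 1 ≤ p)) xs = xs :=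
        List.filter_eq_self.2 (fun p hp => by simp only [decide_eq_true_eq]; have := hx p hp; omega)
      rw [h1, h2]
    · simp only [List.filter_cons, decide_eq_true_eq, hcx] at h
      have hu : u ∈ xs := List.mem_of_mem_filter (h ▸ List.mem_cons_self ..)
      have hxu : ¬ (u + 1 ≤ x) := by have := hx u hu; omega
      simp only [List.filter_cons, decide_eq_true_eq, hxu]
      exact ih hxs h

theorem filter_head_stable {l : List Int} (hl : l.Pairwise (· < ·)) {c v : Int} {t : List Int}
    (h : l.filter (fun p => decide (c ≤ p)) = v :: t) :
    l.filter (fun p => decide (v ≤ p)) = v :: t := by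
  induction l with
  | nil => simp at h
  | cons x xs ih =>
    rcases List.pairwise_cons.1 hl with ⟨hx, hxs⟩
    by_cases hcx : c ≤ x
    · simp only [List.filter_cons, decide_eq_true_eq, hcx, if_pos] at h
      obtain ⟨rfl, rfl⟩ := List.cons_eq_cons.1 h
      simp only [List.filter_cons, le_refl, decide_true, if_pos]
      congr 1
      apply List.filter_congr
      intro p hp
      have := hx p hp
      simp only [decide_eq_decide]
      constructor <;> intro <;> omega
    · simp only [List.filter_cons, decide_eq_true_eq, hcx] at h
      have hv : v ∈ xs := List.mem_of_mem_filter (h ▸ List.mem_cons_self ..)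
      have hxv : ¬ (v ≤ x) := by have := hx v hv; omega
      simp only [List.filter_cons, decide_eq_true_eq, hxv]
      exact ih hxs h

theorem headD_eq_of_min {l : List Int} (hl : l.Pairwise (· < ·)) {v : Int}
    (hv : v ∈ l) (hmin : ∀ p ∈ l, v ≤ p) : l.headD (-1) = v := by
  cases l with
  | nil => cases hv
  | cons x xs =>
    have hxv : v ≤ x := hmin x (List.mem_cons_self ..)
    rcases List.mem_cons.1 hv with rfl | hv'
    · rfl
    · have := (List.pairwise_cons.1 hl).1 v hv'
      simp only [List.headD_cons]
      omega

theorem infix_drop_of_prefix_drop {hc m : List Char} {j k : Nat}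
    (h : m <+: hc.drop j) (hkj : k ≤ j) : m <:+: hc.drop k := by
  have : hc.drop j = (hc.drop k).drop (j - k) := by
    rw [List.drop_drop]
    congr 1
    omega
  rw [this] at h
  exact h.isInfix.trans (List.drop_suffix _ _).isInfix

-- findFrom computes the head of the filtered occurrence index
theorem findFrom_occ (hc m : List Char) (hm : m ≠ []) (ci : Int) (h0 : 0 ≤ ci)
    (hL : ci ≤ (hc.length : Int)) :
    PySem.Chars.findFrom hc m ci =
      ((pvOcc hc m).filter (fun p => decide (ci ≤ p))).headD (-1) := by
  have hk : ci.toNat ≤ hc.length := by omega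
  have hci : ((ci.toNat : Nat) : Int) = ci := Int.toNat_of_nonneg h0
  rw [← hci, PySem.Chars.findFrom_natCast hc m ci.toNat hk]
  by_cases h1 : PySem.Chars.find (List.drop ci.toNat hc) m = -1
  · rw [if_pos h1]
    have hnil : (pvOcc hc m).filter (fun p => decide (((ci.toNat : Nat) : Int) ≤ p)) = [] := by
      rw [List.filter_eq_nil_iff]
      intro p hp
      rcases mem_pvOcc.1 hp with ⟨hp0, hpl, hppre⟩
      simp only [decide_eq_true_eq, not_le]
      by_contra hle
      push_neg at hle
      have hkp : ci.toNat ≤ p.toNat := by omega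
      have := (PySem.Chars.find_eq_neg_one_iff (List.drop ci.toNat hc) m).1 h1
      exact this (infix_drop_of_prefix_drop hppre hkp)
    rw [hnil]
    rfl
  · rw [if_neg h1]
    have hf0 : 0 ≤ PySem.Chars.find (List.drop ci.toNat hc) m := by
      have := PySem.Chars.neg_one_le_find (List.drop ci.toNat hc) m
      omega
    set f := PySem.Chars.find (List.drop ci.toNat hc) m with hfdef
    rcases PySem.Chars.find_spec hf0 with ⟨hpre, hmin⟩
    rw [List.drop_drop] at hpre
    have hvmem : ((ci.toNat : Int) + f) ∈ (pvOcc hc m).filter (fun p => decide (((ci.toNat : Nat) : Int) ≤ p)) := by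
      rw [List.mem_filter]
      constructor
      · rw [mem_pvOcc]
        refine ⟨by omega, ?_, ?_⟩
        · have hlen := hpre.length_le
          have hml : 1 ≤ m.length := by
            cases m with | nil => exact absurd rfl hm | cons a b => simp
          simp only [List.length_drop] at hlen
          omega
        · have heq : ((ci.toNat : Int) + f).toNat = ci.toNat + f.toNat := by omega
          rw [heq]
          exact hpre
      · simp only [decide_eq_true_eq]
        omega
    have hmin' : ∀ p ∈ (pvOcc hc m).filter (fun p => decide (((ci.toNat : Nat) : Int) ≤ p)),
        ((ci.toNat : Int) + f) ≤ p := by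
      intro p hp
      rcases List.mem_filter.1 hp with ⟨hpo, hpge⟩
      rcases mem_pvOcc.1 hpo with ⟨hp0, hpl, hppre⟩
      simp only [decide_eq_true_eq] at hpge
      by_contra hlt
      push_neg at hlt
      have h2 : p.toNat - ci.toNat < f.toNat := by omega
      have : m <+: List.drop (p.toNat - ci.toNat) (List.drop ci.toNat hc) := by
        rw [List.drop_drop]
        have heq : ci.toNat + (p.toNat - ci.toNat) = p.toNat := by omega
        rw [heq]
        exact hppre
      exact hmin _ h2 this
    exact (headD_eq_of_min ((pvOcc_sorted hc m).filter _) hvmem hmin').symm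

-- the longer marker is never preferred: its first occurrence is a short-marker occurrence too
theorem findFrom_sub (hc m mq : List Char) (hm : m ≠ []) (hpre : m <+: mq) (ci : Int)
    (h0 : 0 ≤ ci) (hL : ci ≤ (hc.length : Int)) (h : PySem.Chars.findFrom hc mq ci ≠ -1) :
    PySem.Chars.findFrom hc m ci ≠ -1 ∧
      PySem.Chars.findFrom hc m ci ≤ PySem.Chars.findFrom hc mq ci := by
  have hk : ci.toNat ≤ hc.length := by omega
  have hci : ((ci.toNat : Nat) : Int) = ci := Int.toNat_of_nonneg h0
  rw [← hci] at h ⊢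
  rcases PySem.Chars.findFrom_natCast_spec hc mq ci.toNat hk h with ⟨hq0, hqpre, _⟩
  have hmq : m <+: List.drop (PySem.Chars.findFrom hc mq ((ci.toNat : Nat) : Int)).toNat hc :=
    hpre.trans hqpre
  have hne : PySem.Chars.findFrom hc m ((ci.toNat : Nat) : Int) ≠ -1 := by
    intro hcon
    rw [PySem.Chars.findFrom_natCast_eq_neg_one_iff hc m ci.toNat hk] at hcon
    exact hcon (infix_drop_of_prefix_drop hmq (by omega))
  refine ⟨hne, ?_⟩
  rcases PySem.Chars.findFrom_natCast_spec hc m ci.toNat hk hne with ⟨hm0, _, hmmin⟩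
  by_contra hlt
  push_neg at hlt
  exact hmmin (PySem.Chars.findFrom hc mq ((ci.toNat : Nat) : Int)).toNat (by omega) (by omega) hmq

theorem pvFindPos2_eq (hc m mq : List Char) (hm : m ≠ []) (hpre : m <+: mq) (ci : Int)
    (h0 : 0 ≤ ci) (hL : ci ≤ (hc.length : Int)) :
    pvFindPos2 hc m mq ci = ((pvOcc hc m).filter (fun p => decide (ci ≤ p))).headD (-1) := by
  have h1 := findFrom_occ hc m hm ci h0 hL
  simp only [pvFindPos2]
  rw [h1]
  set v := ((pvOcc hc m).filter (fun p => decide (ci ≤ p))).headD (-1) with hvdef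
  simp only [true_or, and_true]
  by_cases hq : PySem.Chars.findFrom hc mq ci = -1
  · split_ifs <;> omega
  · rcases findFrom_sub hc m mq hm hpre ci h0 hL hq with ⟨hne, hle⟩
    rw [h1] at hne hle
    split_ifs <;> omega

theorem pvFind2_eq (hc m mq : List Char) (hm : m ≠ []) (hpre : m <+: mq) (ci : Int)
    (h0 : 0 ≤ ci) (hL : ci ≤ (hc.length : Int)) :
    pvFind2 hc m mq ci =
      (((pvOcc hc m).filter (fun p => decide (ci ≤ p))).headD (-1),
        if ((pvOcc hc m).filter (fun p => decide (ci ≤ p))).headD (-1) = -1 then [] else m) := by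
  have h1 := findFrom_occ hc m hm ci h0 hL
  simp only [pvFind2]
  rw [h1]
  set v := ((pvOcc hc m).filter (fun p => decide (ci ≤ p))).headD (-1) with hvdef
  simp only [true_or, and_true, Prod.mk.injEq]
  by_cases hq : PySem.Chars.findFrom hc mq ci = -1
  · split_ifs <;> first
      | (exfalso; omega)
      | (exact ⟨by omega, rfl⟩)
  · rcases findFrom_sub hc m mq hm hpre ci h0 hL hq with ⟨hne, hle⟩
    rw [h1] at hne hle
    split_ifs <;> first
      | (exfalso; omega)
      | (exact ⟨by omega, rfl⟩)

theorem loop_eq (hc : List Char) (fuel : Nat) :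
    ∀ (ci : Int) (us as_ : List Int) (msgs : List (List (String × String))),
    0 ≤ ci →
    us = (pvOcc hc pvUser).filter (fun p => decide (ci ≤ p)) →
    (∃ ca : Int, 0 ≤ ca ∧ ca ≤ ci ∧ as_ = (pvOcc hc pvAsst).filter (fun p => decide (ca ≤ p))) →
    us.length < fuel →
    pvALoop hc fuel ci msgs = msgs ++ pvBLoop hc us as_ := by
  induction fuel with
  | zero => intro ci us as_ msgs _ _ _ h; exact absurd h (Nat.not_lt_zero _)
  | succ fuel ih =>
    intro ci us as_ msgs h0 hus has hfuel
    by_cases hciL : ci < (hc.length : Int)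
    · have hLL : ci ≤ (hc.length : Int) := le_of_lt hciL
      have hUne : pvUser ≠ [] := by decide
      have hAne : pvAsst ≠ [] := by decide
      have hUpre : pvUser <+: pvUserQ := ⟨[' ', '"', '"', '"'], rfl⟩
      have hApre : pvAsst <+: pvAsstQ := ⟨[' ', '"', '"', '"'], rfl⟩
      have hUf := pvFind2_eq hc pvUser pvUserQ hUne hUpre ci h0 hLL
      cases us with
      | nil =>
        have hfil : (pvOcc hc pvUser).filter (fun p => decide (ci ≤ p)) = [] := hus.symm
        rw [hfil] at hUf
        simp only [pvALoop, if_pos hciL, hUf]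
        simp [pvBLoop]
      | cons u ut =>
        have hfil : (pvOcc hc pvUser).filter (fun p => decide (ci ≤ p)) = u :: ut := hus.symm
        have humem : u ∈ (pvOcc hc pvUser).filter (fun p => decide (ci ≤ p)) := by
          rw [hfil]; exact List.mem_cons_self ..
        rcases List.mem_filter.1 humem with ⟨huo, huge⟩
        rcases mem_pvOcc.1 huo with ⟨hu0, huL, hupre⟩
        have hciu : ci ≤ u := by simpa using huge
        rw [hfil] at hUf
        have hu_ne : u ≠ -1 := by omega
        simp only [List.headD_cons, if_neg hu_ne] at hUf
        have h5L : u + 5 ≤ (hc.length : Int) := by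
          have hlen := hupre.length_le
          simp only [List.length_drop] at hlen
          have h5 : pvUser.length = 5 := rfl
          rw [h5] at hlen
          have : ((u.toNat : Nat) : Int) = u := Int.toNat_of_nonneg hu0
          omega
        have h05 : (0:Int) ≤ u + 5 := by omega
        have hA2 := pvFindPos2_eq hc pvAsst pvAsstQ hAne hApre (u + 5) h05 h5L
        have hN2 := pvFindPos2_eq hc pvUser pvUserQ hUne hUpre (u + 5) h05 h5L
        have hut : ut = (pvOcc hc pvUser).filter (fun p => decide (u + 1 ≤ p)) :=
          filter_tail_eq (pvOcc_sorted hc pvUser) hfil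
        have hskipu : pvSkipLt (u + 5) ut =
            (pvOcc hc pvUser).filter (fun p => decide (u + 5 ≤ p)) := by
          rw [hut]; exact pvSkipLt_filter (pvOcc_sorted hc pvUser) (by omega)
        obtain ⟨ca, hca0, hcaci, hasfil⟩ := has
        have hskipa : pvSkipLt (u + 5) as_ =
            (pvOcc hc pvAsst).filter (fun p => decide (u + 5 ≤ p)) := by
          rw [hasfil]; exact pvSkipLt_filter (pvOcc_sorted hc pvAsst) (by omega)
        have hfuel' : ut.length < fuel := by
          simp only [List.length_cons] at hfuel; omega
        have hF1len : ((pvOcc hc pvUser).filter (fun p => decide (u + 5 ≤ p))).length ≤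
            ut.length := by
          rw [← hskipu]; exact pvSkipLt_length_le _ _
        have hlen5 : (pvUser.length : Int) = 5 := rfl
        have hlen10 : (pvAsst.length : Int) = 10 := rfl
        -- unfold one A step and one B step
        simp only [pvALoop, if_pos hciL, hUf, pvBLoop, hskipu, hskipa, hlen5, hlen10]
        cases hF2 : (pvOcc hc pvAsst).filter (fun p => decide (u + 5 ≤ p)) with
        | nil =>
          rw [hF2] at hA2
          simp only [List.headD_nil] at hA2
          cases hF1 : (pvOcc hc pvUser).filter (fun p => decide (u + 5 ≤ p)) with
          | nil =>
            rw [hF1] at hN2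
            simp only [List.headD_nil] at hN2
            simp [hA2, hN2, hu_ne, pvSeg]
          | cons nu nt =>
            rw [hF1] at hN2
            simp only [List.headD_cons] at hN2
            have hnu_mem : nu ∈ (pvOcc hc pvUser).filter (fun p => decide (u + 5 ≤ p)) := by
              rw [hF1]; exact List.mem_cons_self ..
            rcases mem_pvOcc.1 (List.mem_of_mem_filter hnu_mem) with ⟨hnu0, _, _⟩
            have hnu_ne : nu ≠ -1 := by omega
            simp [hA2, hN2, hu_ne, hnu_ne, pvSeg]
        | cons a arest =>
          rw [hF2] at hA2
          simp only [List.headD_cons] at hA2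
          have ha_mem : a ∈ (pvOcc hc pvAsst).filter (fun p => decide (u + 5 ≤ p)) := by
            rw [hF2]; exact List.mem_cons_self ..
          rcases List.mem_filter.1 ha_mem with ⟨hao, hage⟩
          rcases mem_pvOcc.1 hao with ⟨ha0, haL, hapre⟩
          have ha_ne : a ≠ -1 := by omega
          cases hF1 : (pvOcc hc pvUser).filter (fun p => decide (u + 5 ≤ p)) with
          | nil =>
            rw [hF1] at hN2
            simp only [List.headD_nil] at hN2
            simp only [hA2, hN2]
            simp [hu_ne, ha_ne, pvSeg]
            rw [ih (hc.length : Int) [] (a :: arest) _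
              (Int.natCast_nonneg _)
              (pvOcc_filter_len (le_refl _)).symm
              ⟨u + 5, h05, h5L, hF2.symm⟩
              (by simp only [List.length_nil]; omega)]
            simp
          | cons nu nt =>
            rw [hF1] at hN2
            simp only [List.headD_cons] at hN2
            have hnu_mem : nu ∈ (pvOcc hc pvUser).filter (fun p => decide (u + 5 ≤ p)) := by
              rw [hF1]; exact List.mem_cons_self ..
            rcases List.mem_filter.1 hnu_mem with ⟨hnuo, hnuge⟩
            rcases mem_pvOcc.1 hnuo with ⟨hnu0, hnuL, hnupre⟩
            have hnuge' : u + 5 ≤ nu := by simpa using hnuge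
            have hnu_ne : nu ≠ -1 := by omega
            simp only [hA2, hN2]
            simp [hu_ne, ha_ne, hnu_ne, pvSeg]
            rw [ih nu (nu :: nt) (a :: arest) _
              (by omega)
              (filter_head_stable (pvOcc_sorted hc pvUser) hF1).symm
              ⟨u + 5, h05, by omega, hF2.symm⟩
              (by rw [hF1] at hF1len; simp only [List.length_cons] at hF1len ⊢; omega)]
            simp
    · have husnil : us = [] := by
        rw [hus]; exact pvOcc_filter_len (by omega)
      simp [pvALoop, hciL, husnil, pvBLoop]

theorem loop_top (hc : List Char) :
    pvALoop hc (hc.length + 1) 0 [] = pvBLoop hc (pvOcc hc pvUser) (pvOcc hc pvAsst) := by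
  have h1 : pvOcc hc pvUser = (pvOcc hc pvUser).filter (fun p => decide ((0:Int) ≤ p)) := by
    rw [List.filter_eq_self.2]
    intro p hp
    rcases mem_pvOcc.1 hp with ⟨hp0, _, _⟩
    simpa using hp0
  have h2 : pvOcc hc pvAsst = (pvOcc hc pvAsst).filter (fun p => decide ((0:Int) ≤ p)) := by
    rw [List.filter_eq_self.2]
    intro p hp
    rcases mem_pvOcc.1 hp with ⟨hp0, _, _⟩
    simpa using hp0
  have := loop_eq hc (hc.length + 1) 0 (pvOcc hc pvUser) (pvOcc hc pvAsst) [] (le_refl 0)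
    h1 ⟨0, le_refl 0, le_refl 0, h2⟩
    (Nat.lt_succ_of_le (pvOcc_length_le hc pvUser))
  simpa using this

-- ===== VERDICT (by name: the statement is the Claim_ definition above) =====
theorem extract_final_query_py_spec : Claim_equal_extract_final_query_py := by
  intro content _
  unfold Spec_extract_final_query_py
  simp only [extract_final_query_py, extract_final_query_py_alt, loop_top]
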